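-- pv_equiv track=rewrite | github.com/acristianno/Exercicios | Python_principles/maximo_minimo.py | largest_difference
-- ===== SOURCE A (Python) =====
-- def largest_difference(lista_numeros):
--     menor = lista_numeros[0]
--     maior = lista_numeros[0]
--     for numero in lista_numeros:
--         if numero < menor:
--             menor = numero
--         elif numero > maior:
--             maior = numero
--     diferenca = maior - menor
--     return f'O maior número informado foi {maior} o menor número informado foi {menor} a diferença entre os ' \
--            f'números é {diferenca}'
-- ===== SOURCE B (Python) =====
-- def largest_difference(lista_numeros):
--     ordenada = sorted(lista_numeros)
--     menor = ordenada[0]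
--     maior = ordenada[-1]
--     diferenca = maior - menor
--     return f'O maior número informado foi {maior} o menor número informado foi {menor} a diferença entre os ' \
--            f'números é {diferenca}'
-- ===== Notes on version B (the rewrite author's own statement) =====
-- stated objective: alternative
-- what changed: Replaces the single-pass min/max scan with sort-then-index: sort the list once and read the minimum and maximum off the endpoints of the sorted list.
-- outside the precondition, e.g. on largest_difference([]): A raises IndexError, B raises IndexError
import Mathlib
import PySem

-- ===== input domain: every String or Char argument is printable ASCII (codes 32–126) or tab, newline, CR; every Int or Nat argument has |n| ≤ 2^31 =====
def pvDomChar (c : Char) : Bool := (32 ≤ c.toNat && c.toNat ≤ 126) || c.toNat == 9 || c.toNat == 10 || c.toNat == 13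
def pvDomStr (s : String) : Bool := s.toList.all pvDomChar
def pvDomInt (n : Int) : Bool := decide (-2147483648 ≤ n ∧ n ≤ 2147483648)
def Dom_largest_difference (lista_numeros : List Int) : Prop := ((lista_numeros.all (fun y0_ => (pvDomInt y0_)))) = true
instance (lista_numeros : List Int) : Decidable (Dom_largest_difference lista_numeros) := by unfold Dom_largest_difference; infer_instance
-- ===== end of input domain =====

-- B replaces A's single combined min/max scan by sort-then-index (endpoints of the sorted list); alternative decomposition, not faster.


-- ===== PORT A =====
def pvMsg (maior menor diferenca : Int) : String :=
  "O maior número informado foi " ++ PySem.Int.toStr maior ++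
  " o menor número informado foi " ++ PySem.Int.toStr menor ++
  " a diferença entre os números é " ++ PySem.Int.toStr diferenca

def largest_difference (lista_numeros : List Int) : String :=
  match PySem.List.pyGet? lista_numeros 0 with
  | none => ""  -- IndexError in Python: excluded by Pre_
  | some h =>
    let st := lista_numeros.foldl
      (fun (s : Int × Int) numero =>
        if numero < s.1 then (numero, s.2)
        else if numero > s.2 then (s.1, numero)
        else s) (h, h)
    pvMsg st.2 st.1 (st.2 - st.1)

-- ===== PORT B =====
def largest_difference_alt (lista_numeros : List Int) : String :=
  match PySem.List.pyGet? (PySem.List.sorted lista_numeros (fun x => x) false) 0,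
        PySem.List.pyGet? (PySem.List.sorted lista_numeros (fun x => x) false) (-1) with
  | some menor, some maior => pvMsg maior menor (maior - menor)
  | _, _ => ""  -- IndexError in Python: excluded by Pre_

-- ===== PRECONDITION & SPEC =====
-- A raises IndexError on the empty list (B does too); excluded.
def Pre_largest_difference (lista_numeros : List Int) : Prop := lista_numeros ≠ []
instance (lista_numeros : List Int) : Decidable (Pre_largest_difference lista_numeros) := by unfold Pre_largest_difference; infer_instance
def pvWitness_largest_difference : List Int := [3, 1, 2]

def Spec_largest_difference (lista_numeros : List Int) (out : String) : Prop := out = largest_difference_alt lista_numeros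
instance (lista_numeros : List Int) (out : String) : Decidable (Spec_largest_difference lista_numeros out) := by unfold Spec_largest_difference; infer_instance

-- ===== CLAIM (what is proved, stated in full; the proofs are below) =====
def Claim_equal_largest_difference : Prop := ∀ (lista_numeros : List Int), Dom_largest_difference lista_numeros → Pre_largest_difference lista_numeros → Spec_largest_difference lista_numeros (largest_difference lista_numeros)

-- ===== LEMMAS AND PROOFS =====

-- A's fold, starting from (m, M) with m ≤ M, computes running min and max.
theorem foldA_min_max (xs : List Int) : ∀ (m M : Int), m ≤ M →
    xs.foldl (fun (s : Int × Int) numero =>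
        if numero < s.1 then (numero, s.2)
        else if numero > s.2 then (s.1, numero)
        else s) (m, M)
      = (xs.foldl min m, xs.foldl max M) := by
  induction xs with
  | nil => intro m M _; rfl
  | cons x t ih =>
    intro m M hmM
    simp only [List.foldl_cons]
    have hstep : (if x < m then (x, M) else if x > M then (m, x) else (m, M))
        = ((min m x : Int), (max M x : Int)) := by
      split_ifs with h1 h2 <;> simp_all <;> omega
    rw [hstep]
    exact ih (min m x) (max M x) (by omega)

theorem foldl_min_le (xs : List Int) : ∀ (a : Int), xs.foldl min a ≤ a ∧ ∀ y ∈ xs, xs.foldl min a ≤ y := by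
  induction xs with
  | nil => intro a; simp
  | cons x t ih =>
    intro a
    have h := ih (min a x)
    simp only [List.foldl_cons]
    refine ⟨le_trans h.1 (by omega), ?_⟩
    intro y hy
    rcases List.mem_cons.mp hy with rfl | hy
    · exact le_trans h.1 (by omega)
    · exact h.2 y hy

theorem foldl_min_mem (xs : List Int) : ∀ (a : Int), xs.foldl min a = a ∨ xs.foldl min a ∈ xs := by
  induction xs with
  | nil => intro a; simp
  | cons x t ih =>
    intro a
    simp only [List.foldl_cons]
    rcases ih (min a x) with h | h
    · by_cases hax : a ≤ x
      · left; rw [h]; omega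
      · right; rw [h]; simp; left; omega
    · right; exact List.mem_cons_of_mem _ h

theorem foldl_max_le (xs : List Int) : ∀ (a : Int), a ≤ xs.foldl max a ∧ ∀ y ∈ xs, y ≤ xs.foldl max a := by
  induction xs with
  | nil => intro a; simp
  | cons x t ih =>
    intro a
    have h := ih (max a x)
    simp only [List.foldl_cons]
    refine ⟨le_trans (by omega) h.1, ?_⟩
    intro y hy
    rcases List.mem_cons.mp hy with rfl | hy
    · exact le_trans (by omega) h.1
    · exact h.2 y hy

theorem foldl_max_mem (xs : List Int) : ∀ (a : Int), xs.foldl max a = a ∨ xs.foldl max a ∈ xs := by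
  induction xs with
  | nil => intro a; simp
  | cons x t ih =>
    intro a
    simp only [List.foldl_cons]
    rcases ih (max a x) with h | h
    · by_cases hax : x ≤ a
      · left; rw [h]; omega
      · right; rw [h]; simp; left; omega
    · right; exact List.mem_cons_of_mem _ h

-- in a ≤-sorted list every element is at most the last one
theorem pairwise_le_getLast (l : List Int) (hl : l.Pairwise (fun a b => (a : Int) ≤ b)) (y : Int) (hy : y ∈ l) (h : l ≠ []) : y ≤ l.getLast h := by
  induction l with
  | nil => simp at hy
  | cons x t ih =>
    cases t with
    | nil => simp at hy; simp [hy, List.getLast]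
    | cons z s =>
      rw [List.getLast_cons (by simp)]
      rcases List.mem_cons.mp hy with rfl | hyt
      · exact (List.pairwise_cons.mp hl).1 _ (List.getLast_mem (by simp))
      · exact ih (List.pairwise_cons.mp hl).2 hyt (by simp)

theorem largest_difference_spec : Claim_equal_largest_difference := by
  intro xs _ hpre
  unfold Spec_largest_difference
  obtain ⟨h, t, rfl⟩ : ∃ h t, xs = h :: t := by
    cases xs with
    | nil => exact absurd rfl hpre
    | cons a b => exact ⟨a, b, rfl⟩
  -- A side
  unfold largest_difference
  rw [PySem.List.pyGet?_zero_cons]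
  simp only []
  rw [foldA_min_max (h :: t) h h le_rfl]
  -- B side
  obtain ⟨b, s, hsort⟩ : ∃ b s, PySem.List.sorted (h :: t) (fun x => x) false = b :: s := by
    cases hs : PySem.List.sorted (h :: t) (fun x => x) false with
    | nil =>
      have : (h :: t : List Int) = [] := (PySem.List.sorted_eq_nil_iff _ _ _).mp hs
      simp at this
    | cons a c => exact ⟨a, c, rfl⟩
  have hperm : (PySem.List.sorted (h :: t) (fun x => x) false).Perm (h :: t) := PySem.List.sorted_perm ..
  have hpw : (PySem.List.sorted (h :: t) (fun x => x) false).Pairwise (fun a c => (a : Int) ≤ c) :=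
    PySem.List.sorted_pairwise ..
  rw [hsort] at hperm hpw
  unfold largest_difference_alt
  rw [hsort]
  have hne : (b :: s : List Int) ≠ [] := by simp
  rw [show PySem.List.pyGet? (b :: s) (-1) = some ((b :: s).getLast hne) by
    rw [PySem.List.pyGet?_neg_one, List.getLast?_eq_some_getLast]]
  rw [PySem.List.pyGet?_zero_cons]
  simp only []
  -- b = A's min, getLast = A's max
  have hminA_le := foldl_min_le (h :: t) h
  have hminA_mem : (h :: t).foldl min h ∈ (h :: t) := by
    rcases foldl_min_mem (h :: t) h with he | he
    · rw [he]; simp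
    · exact he
  have hmaxA_le := foldl_max_le (h :: t) h
  have hmaxA_mem : (h :: t).foldl max h ∈ (h :: t) := by
    rcases foldl_max_mem (h :: t) h with he | he
    · rw [he]; simp
    · exact he
  have hb_le : ∀ y ∈ (h :: t), b ≤ y := PySem.List.key_head_sorted_le (h :: t) (fun x => x) hsort
  have hb_mem : b ∈ (h :: t) := hperm.mem_iff.mp (by simp)
  have hlast_mem : (b :: s).getLast hne ∈ (h :: t) := hperm.mem_iff.mp (List.getLast_mem hne)
  have hlast_ge : ∀ y ∈ (h :: t), y ≤ (b :: s).getLast hne := by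
    intro y hy
    exact pairwise_le_getLast (b :: s) hpw y (hperm.mem_iff.mpr hy) hne
  have hmin_eq : (h :: t).foldl min h = b :=
    le_antisymm (hminA_le.2 b hb_mem) (hb_le _ hminA_mem)
  have hmax_eq : (h :: t).foldl max h = (b :: s).getLast hne :=
    le_antisymm (hlast_ge _ hmaxA_mem) (hmaxA_le.2 _ hlast_mem)
  simp [hmin_eq, hmax_eq]
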